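-- pv_equiv track=rewrite | github.com/Thalles02/TCC | src/helpers/helpers.py | get_ordered_table_columns
-- ===== SOURCE A (Python) =====
-- def get_ordered_table_columns(
--     all_record_keys: set,
--     table_identifier: str, # Pode ser o token da tabela, usado para adivinhar o nome da coluna ID
--     columns_to_hide: set,
--     priority_columns_after_id: list = None,
--     default_fallback_column_name: str = "ID" # Usado se records for vazio e all_record_keys for {"id"}
--                                             # ou se nenhuma outra coluna for encontrada
-- ) -> list:
--     """
--     Ordena as colunas para exibição em uma tabela.
--     A ordem de prioridade é:
--     1. Coluna de ID (inferida a partir de table_identifier, "id", ou prefixo "id_").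
--     2. Colunas em `priority_columns_after_id` (ex: "criado_em").
--     3. Outras colunas visíveis, em ordem alfabética.
--     Colunas em `columns_to_hide` são sempre omitidas.
--     """
--     if priority_columns_after_id is None:
--         priority_columns_after_id = ["criado_em"] # Default
--
--     # Se não há chaves de entrada (ex: API não retornou campos), retorna um fallback.
--     if not all_record_keys:
--         return [default_fallback_column_name] # Ou uma lista vazia, dependendo do desejado
--
--     visible_keys = all_record_keys.difference(columns_to_hide)
--
--     # Se todas as colunas foram escondidas ou não havia colunas visíveis para começar
--     if not visible_keys:
--         # Se all_record_keys era originalmente {"id"} (fallback para records vazios)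
--         # e "id" não está em columns_to_hide, isso não deveria acontecer.
--         # Mas se todas as chaves eram para esconder, retornamos o fallback.
--         return [default_fallback_column_name]
--
--     ordered_columns_list = []
--     processed_keys = set()
--
--     # Etapa 1: Identificar e adicionar a coluna de ID principal
--     # Tentativa A: O table_identifier (token da tabela) é o nome da coluna ID
--     if table_identifier in visible_keys:
--         ordered_columns_list.append(table_identifier)
--         processed_keys.add(table_identifier)
--     # Tentativa B: A coluna se chama exatamente "id"
--     elif "id" in visible_keys:
--         ordered_columns_list.append("id")
--         processed_keys.add("id")
--     # Tentativa C: Procurar por colunas que começam com "id_"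
--     else:
--         # Pega a primeira em ordem alfabética para consistência
--         id_prefix_candidates = sorted([
--             key for key in visible_keys if key.startswith("id_") and key not in processed_keys
--         ])
--         if id_prefix_candidates:
--             chosen_id_col = id_prefix_candidates[0]
--             ordered_columns_list.append(chosen_id_col)
--             processed_keys.add(chosen_id_col)
--
--     # Etapa 2: Adicionar colunas prioritárias (ex: "criado_em")
--     for col_name in priority_columns_after_id:
--         if col_name in visible_keys and col_name not in processed_keys:
--             ordered_columns_list.append(col_name)
--             processed_keys.add(col_name)
--
--     # Etapa 3: Adicionar as colunas restantes em ordem alfabética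
--     remaining_visible_keys = sorted(list(visible_keys.difference(processed_keys)))
--     ordered_columns_list.extend(remaining_visible_keys)
--
--     # Fallback final: se a lista ainda estiver vazia mas havia chaves visíveis
--     # (isso pode acontecer se as chaves visíveis não se encaixaram em nenhuma regra acima)
--     # Ou se o conjunto inicial era apenas o fallback "id" e ele foi pego.
--     if not ordered_columns_list and visible_keys:
--         return sorted(list(visible_keys)) # Simplesmente retorna as visíveis ordenadas
--     elif not ordered_columns_list: # Se realmente não há nada para mostrar
--         return [default_fallback_column_name]
--
--
--     return ordered_columns_list
-- ===== SOURCE B (Python) =====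
-- def get_ordered_table_columns(
--     all_record_keys: set,
--     table_identifier: str,
--     columns_to_hide: set,
--     priority_columns_after_id: list = None,
--     default_fallback_column_name: str = "ID"
-- ) -> list:
--     # One sorted() call with a composite rank key instead of three staged passes.
--     pri = ["criado_em"] if priority_columns_after_id is None else priority_columns_after_id
--     if not all_record_keys:
--         return [default_fallback_column_name]
--     visible = all_record_keys.difference(columns_to_hide)
--     if not visible:
--         return [default_fallback_column_name]
--     if table_identifier in visible:
--         chosen = table_identifier
--     elif "id" in visible:
--         chosen = "id"
--     else:
--         candidates = sorted(k for k in visible if k.startswith("id_"))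
--         chosen = candidates[0] if candidates else None
--     rank = {}
--     for i, c in enumerate(pri):
--         if c not in rank:
--             rank[c] = i
--     big = 1 + len(pri)
--     def sort_key(k):
--         if k == chosen:
--             return (0, "")
--         if k in rank:
--             return (1 + rank[k], "")
--         return (big, k)
--     return sorted(visible, key=sort_key)
-- ===== Notes on version B (the rewrite author's own statement) =====
-- stated objective: simpler
-- what changed: A's three staged passes (ID pick appended, priority loop threading a processed-keys set, alphabetical remainder) are replaced by one sorted() call over the visible keys with a composite (group-rank, name) key: 0 for the chosen ID column, 1+index for priority columns, a sentinel with the name as tiebreak for the rest.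
import Mathlib
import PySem

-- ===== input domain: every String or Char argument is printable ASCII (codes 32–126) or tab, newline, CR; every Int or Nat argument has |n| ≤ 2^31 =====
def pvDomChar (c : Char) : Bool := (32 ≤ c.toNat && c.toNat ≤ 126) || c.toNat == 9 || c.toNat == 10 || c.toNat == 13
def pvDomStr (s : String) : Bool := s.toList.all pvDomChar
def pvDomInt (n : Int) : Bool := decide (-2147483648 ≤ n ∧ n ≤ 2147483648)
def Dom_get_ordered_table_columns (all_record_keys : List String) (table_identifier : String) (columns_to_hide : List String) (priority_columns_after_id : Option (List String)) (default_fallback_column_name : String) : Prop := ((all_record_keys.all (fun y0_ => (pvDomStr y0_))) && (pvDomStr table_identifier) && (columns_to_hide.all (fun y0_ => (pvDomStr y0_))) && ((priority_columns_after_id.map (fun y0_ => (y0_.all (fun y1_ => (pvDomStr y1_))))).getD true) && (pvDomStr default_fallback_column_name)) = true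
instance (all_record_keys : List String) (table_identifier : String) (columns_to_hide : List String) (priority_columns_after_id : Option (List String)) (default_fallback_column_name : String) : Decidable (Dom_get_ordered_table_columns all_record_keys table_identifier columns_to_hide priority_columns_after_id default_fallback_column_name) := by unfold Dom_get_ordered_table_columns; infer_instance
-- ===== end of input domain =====

-- B replaces A's three staged passes (id pick, priority loop with a processed-set, alphabetical rest)
-- by ONE sorted() call over the visible keys with a composite (group-rank, name) key: objective 'simpler'.

-- ===== PORT A =====
-- Etapa 1 of A: the (ordered_columns_list, processed_keys) state after the ID-column choice.
def pvA_init (visible_keys : List String) (table_identifier : String) : List String × List String :=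
  if PySem.Set.contains visible_keys table_identifier then
    ([table_identifier], PySem.Set.add PySem.Set.empty table_identifier)
  else if PySem.Set.contains visible_keys "id" then
    (["id"], PySem.Set.add PySem.Set.empty "id")
  else
    match PySem.List.sorted (visible_keys.filter (fun key => PySem.Str.startswith key "id_" && !(PySem.Set.contains (PySem.Set.empty : PySem.Set String) key))) (fun x => x) false with
    | chosen_id_col :: _ => ([chosen_id_col], PySem.Set.add PySem.Set.empty chosen_id_col)
    | [] => ([], PySem.Set.empty)

-- Etapa 2 of A: one iteration of the priority-columns loop.
def pvA_step (visible_keys : List String) (st : List String × List String) (col_name : String) : List String × List String :=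
  if PySem.Set.contains visible_keys col_name && !(PySem.Set.contains st.2 col_name) then
    (st.1 ++ [col_name], PySem.Set.add st.2 col_name)
  else st

def get_ordered_table_columns (all_record_keys : List String) (table_identifier : String) (columns_to_hide : List String) (priority_columns_after_id : Option (List String)) (default_fallback_column_name : String) : List String :=
  let priority := priority_columns_after_id.getD ["criado_em"]
  if all_record_keys = [] then [default_fallback_column_name]
  else
    let visible_keys := PySem.Set.diff all_record_keys columns_to_hide
    if visible_keys = [] then [default_fallback_column_name]
    else
      let st := priority.foldl (pvA_step visible_keys) (pvA_init visible_keys table_identifier)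
      let ordered := st.1 ++ PySem.List.sorted (PySem.Set.diff visible_keys st.2) (fun x => x) false
      if ordered = [] ∧ ¬(visible_keys = []) then PySem.List.sorted visible_keys (fun x => x) false
      else if ordered = [] then [default_fallback_column_name]
      else ordered

-- ===== PORT B =====
-- B: resolve the single ID column by the same 3-way fallback.
def pvB_chosen (visible : List String) (table_identifier : String) : Option String :=
  if PySem.Set.contains visible table_identifier then some table_identifier
  else if PySem.Set.contains visible "id" then some "id"
  else
    match PySem.List.sorted (visible.filter (fun k => PySem.Str.startswith k "id_")) (fun x => x) false with
    | c :: _ => some c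
    | [] => none

-- B: rank[c] = first index of c in the priority list (Python: dict built with a skip-if-present loop).
def pvB_rank (priority : List String) : PySem.Dict String Int :=
  (PySem.List.enumerate priority).foldl
    (fun d ic => if (PySem.Dict.get? d ic.2).isSome then d else PySem.Dict.insert d ic.2 ic.1)
    PySem.Dict.empty

-- B: the composite sort key (group rank, name tiebreak); big = 1 + len(pri).
def pvB_key (chosen : Option String) (priority : List String) (rank : PySem.Dict String Int) (k : String) : Int × String :=
  if some k = chosen then (0, "")
  else
    match PySem.Dict.get? rank k with
    | some i => (1 + i, "")
    | none => (1 + priority.length, k)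

def get_ordered_table_columns_alt (all_record_keys : List String) (table_identifier : String) (columns_to_hide : List String) (priority_columns_after_id : Option (List String)) (default_fallback_column_name : String) : List String :=
  let priority := priority_columns_after_id.getD ["criado_em"]
  if all_record_keys = [] then [default_fallback_column_name]
  else
    let visible := PySem.Set.diff all_record_keys columns_to_hide
    if visible = [] then [default_fallback_column_name]
    else
      let chosen := pvB_chosen visible table_identifier
      let rank := pvB_rank priority
      PySem.List.sorted2 visible (fun k => (pvB_key chosen priority rank k).1) (fun k => (pvB_key chosen priority rank k).2) false

-- ===== PRECONDITION & SPEC =====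
-- all_record_keys is a Python set: its List encoding holds distinct elements, so lists with
-- duplicates encode no Python input; Pre_ restricts to the duplicate-free encodings.
def Pre_get_ordered_table_columns (all_record_keys : List String) (table_identifier : String) (columns_to_hide : List String) (priority_columns_after_id : Option (List String)) (default_fallback_column_name : String) : Prop := all_record_keys.Nodup
instance (all_record_keys : List String) (table_identifier : String) (columns_to_hide : List String) (priority_columns_after_id : Option (List String)) (default_fallback_column_name : String) : Decidable (Pre_get_ordered_table_columns all_record_keys table_identifier columns_to_hide priority_columns_after_id default_fallback_column_name) := by unfold Pre_get_ordered_table_columns; infer_instance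

def pvWitness_get_ordered_table_columns : List String × String × List String × Option (List String) × String :=
  (["nome", "id", "criado_em", "x"], "token", ["x"], none, "ID")

def Spec_get_ordered_table_columns (all_record_keys : List String) (table_identifier : String) (columns_to_hide : List String) (priority_columns_after_id : Option (List String)) (default_fallback_column_name : String) (out : List String) : Prop := out = get_ordered_table_columns_alt all_record_keys table_identifier columns_to_hide priority_columns_after_id default_fallback_column_name
instance (all_record_keys : List String) (table_identifier : String) (columns_to_hide : List String) (priority_columns_after_id : Option (List String)) (default_fallback_column_name : String) (out : List String) : Decidable (Spec_get_ordered_table_columns all_record_keys table_identifier columns_to_hide priority_columns_after_id default_fallback_column_name out) := by unfold Spec_get_ordered_table_columns; infer_instance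

-- ===== CLAIM (what is proved, stated in full; the proofs are below) =====
def Claim_equal_get_ordered_table_columns : Prop := ∀ (all_record_keys : List String) (table_identifier : String) (columns_to_hide : List String) (priority_columns_after_id : Option (List String)) (default_fallback_column_name : String), Dom_get_ordered_table_columns all_record_keys table_identifier columns_to_hide priority_columns_after_id default_fallback_column_name → Pre_get_ordered_table_columns all_record_keys table_identifier columns_to_hide priority_columns_after_id default_fallback_column_name → Spec_get_ordered_table_columns all_record_keys table_identifier columns_to_hide priority_columns_after_id default_fallback_column_name (get_ordered_table_columns all_record_keys table_identifier columns_to_hide priority_columns_after_id default_fallback_column_name)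

-- ===== LEMMAS AND PROOFS =====

theorem pvWitness_ok : Dom_get_ordered_table_columns (pvWitness_get_ordered_table_columns.1) (pvWitness_get_ordered_table_columns.2.1) (pvWitness_get_ordered_table_columns.2.2.1) (pvWitness_get_ordered_table_columns.2.2.2.1) (pvWitness_get_ordered_table_columns.2.2.2.2) ∧ Pre_get_ordered_table_columns (pvWitness_get_ordered_table_columns.1) (pvWitness_get_ordered_table_columns.2.1) (pvWitness_get_ordered_table_columns.2.2.1) (pvWitness_get_ordered_table_columns.2.2.2.1) (pvWitness_get_ordered_table_columns.2.2.2.2) := by decide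

-- What A's priority loop selects: the priority names, in order, that are visible and not yet processed.
def pvSel (visible : List String) : List String → List String → List String
  | [], _ => []
  | c :: cs, proc =>
    if PySem.Set.contains visible c && !(PySem.Set.contains proc c) then
      c :: pvSel visible cs (proc ++ [c])
    else pvSel visible cs proc

theorem pvSelConsPos (visible : List String) (c : String) (cs proc : List String)
    (h : (PySem.Set.contains visible c && !(PySem.Set.contains proc c)) = true) :
    pvSel visible (c :: cs) proc = c :: pvSel visible cs (proc ++ [c]) := by
  simp only [pvSel]
  rw [if_pos h]

theorem pvSelConsNeg (visible : List String) (c : String) (cs proc : List String)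
    (h : ¬ (PySem.Set.contains visible c && !(PySem.Set.contains proc c)) = true) :
    pvSel visible (c :: cs) proc = pvSel visible cs proc := by
  simp only [pvSel]
  rw [if_neg h]

theorem pvNotMemOfCond (proc : List String) (c : String)
    (h : (!(PySem.Set.contains proc c)) = true) : c ∉ proc := by
  simp only [Bool.not_eq_true'] at h
  intro hm
  rw [(PySem.Set.contains_iff proc c).mpr hm] at h
  exact absurd h (by decide)

theorem pvSel_foldl (visible : List String) : ∀ (pri lst proc : List String),
    pri.foldl (pvA_step visible) (lst, proc) =
      (lst ++ pvSel visible pri proc, proc ++ pvSel visible pri proc)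
  | [], lst, proc => by simp [pvSel]
  | c :: cs, lst, proc => by
    rw [List.foldl_cons]
    by_cases h : (PySem.Set.contains visible c && !(PySem.Set.contains proc c)) = true
    · have hc : c ∉ proc := pvNotMemOfCond proc c (Bool.and_eq_true_iff.mp h).2
      have hstep : pvA_step visible (lst, proc) c = (lst ++ [c], proc ++ [c]) := by
        simp only [pvA_step]
        rw [if_pos h, PySem.Set.add_of_not_mem hc]
      rw [hstep, pvSel_foldl visible cs (lst ++ [c]) (proc ++ [c]), pvSelConsPos visible c cs proc h]
      simp
    · have hstep : pvA_step visible (lst, proc) c = (lst, proc) := by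
        simp only [pvA_step]
        rw [if_neg h]
      rw [hstep, pvSel_foldl visible cs lst proc, pvSelConsNeg visible c cs proc h]

theorem pvSel_mem (visible : List String) : ∀ (pri proc : List String) (x : String),
    x ∈ pvSel visible pri proc ↔ x ∈ pri ∧ x ∈ visible ∧ x ∉ proc
  | [], proc, x => by simp [pvSel]
  | c :: cs, proc, x => by
    by_cases h : (PySem.Set.contains visible c && !(PySem.Set.contains proc c)) = true
    · have hcv : c ∈ visible := (PySem.Set.contains_iff visible c).mp (Bool.and_eq_true_iff.mp h).1
      have hcp : c ∉ proc := pvNotMemOfCond proc c (Bool.and_eq_true_iff.mp h).2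
      rw [pvSelConsPos visible c cs proc h, List.mem_cons, pvSel_mem visible cs (proc ++ [c]) x]
      by_cases hx : x = c
      · subst hx; simp [hcv, hcp]
      · simp [hx, List.mem_append]
    · rw [pvSelConsNeg visible c cs proc h, pvSel_mem visible cs proc x]
      by_cases hx : x = c
      · constructor
        · rintro ⟨h0, h1, h2⟩
          exact ⟨List.mem_cons_of_mem c h0, h1, h2⟩
        · rintro ⟨h0, h1, h2⟩
          exfalso
          apply h
          rw [hx] at h1 h2
          rw [(PySem.Set.contains_iff visible c).mpr h1, Bool.true_and, Bool.not_eq_true']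
          exact Bool.eq_false_iff.mpr (fun hcon => h2 ((PySem.Set.contains_iff proc c).mp hcon))
      · simp [hx, List.mem_cons]

theorem pvSel_eq_filter_dedup (visible : List String) : ∀ (pri proc : List String),
    pvSel visible pri proc =
      (PySem.List.dedup pri).filter
        (fun x => PySem.Set.contains visible x && !(PySem.Set.contains proc x))
  | [], proc => by simp [pvSel, PySem.List.dedup, PySem.Set.ofList]
  | c :: cs, proc => by
    have hded : PySem.List.dedup (c :: cs) = c :: PySem.Set.discard (PySem.List.dedup cs) c := by
      simp only [PySem.List.dedup]
      exact PySem.Set.ofList_cons c cs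
    rw [hded]
    by_cases h : (PySem.Set.contains visible c && !(PySem.Set.contains proc c)) = true
    · rw [pvSelConsPos visible c cs proc h, pvSel_eq_filter_dedup visible cs (proc ++ [c])]
      rw [List.filter_cons]
      simp only [h, if_true]
      congr 1
      rw [PySem.Set.discard, List.filter_filter]
      apply List.filter_congr
      intro x _
      by_cases hx : x = c
      · subst hx
        simp [List.mem_append]
      · by_cases hv : x ∈ visible
        · by_cases hp : x ∈ proc
          · simp [hv, hp, hx, List.mem_append]
          · simp [hv, hp, hx, List.mem_append]
        · simp [hv, hx, List.mem_append]
    · rw [pvSelConsNeg visible c cs proc h, pvSel_eq_filter_dedup visible cs proc]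
      rw [List.filter_cons]
      simp only [Bool.not_eq_true] at h
      rw [if_neg (fun hc => absurd (h ▸ hc) (by decide))]
      rw [PySem.Set.discard, List.filter_filter]
      apply List.filter_congr
      intro x _
      by_cases hx : x = c
      · subst hx
        simp only [h, Bool.false_and]
      · simp [hx]

theorem pvDedup_pairwise_idx (pri : List String) :
    (PySem.List.dedup pri).Pairwise (fun a b => List.idxOf a pri < List.idxOf b pri) := by
  induction pri with
  | nil => simp [PySem.List.dedup, PySem.Set.ofList]
  | cons c cs ih =>
    have hded : PySem.List.dedup (c :: cs) = c :: PySem.Set.discard (PySem.List.dedup cs) c := by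
      simp only [PySem.List.dedup]
      exact PySem.Set.ofList_cons c cs
    rw [hded, List.pairwise_cons]
    constructor
    · intro b hb
      have hbc : b ≠ c := ((PySem.Set.mem_discard _ _ _).mp hb).2
      rw [List.idxOf_cons_self, List.idxOf_cons_ne cs (fun he => hbc he.symm)]
      exact Nat.succ_pos _
    · have hsub : (PySem.Set.discard (PySem.List.dedup cs) c).Sublist (PySem.List.dedup cs) :=
        List.filter_sublist
      refine List.Pairwise.imp_of_mem ?_ (List.Pairwise.sublist hsub ih)
      intro a b ha hb hab
      have hac : a ≠ c := ((PySem.Set.mem_discard _ _ _).mp ha).2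
      have hbc : b ≠ c := ((PySem.Set.mem_discard _ _ _).mp hb).2
      rw [List.idxOf_cons_ne cs (fun he => hac he.symm), List.idxOf_cons_ne cs (fun he => hbc he.symm)]
      exact Nat.succ_lt_succ hab

theorem pvInsertSort_congr {α : Type} (b1 b2 : α → α → Bool) (h : b1 = b2) (xs : List α) :
    xs.foldl (fun acc x => PySem.List.insertBy b1 x acc) [] =
      xs.foldl (fun acc x => PySem.List.insertBy b2 x acc) [] := by
  rw [h]

theorem pvSorted2_eq_lex (xs : List String) (k1 : String → Int) (k2 : String → String) :
    PySem.List.sorted2 xs k1 k2 false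
      = PySem.List.sorted xs (fun a => toLex (k1 a, k2 a)) false := by
  have hb : (fun a b => decide (k1 a < k1 b) || (!decide (k1 b < k1 a) && decide (k2 a < k2 b)))
          = (fun a b => decide ((toLex (k1 a, k2 a) : Lex (Int × String)) < toLex (k1 b, k2 b))) := by
    funext a b
    by_cases h1 : k1 a < k1 b
    · simp [h1, Prod.Lex.lt_iff]
    · by_cases h2 : k1 b < k1 a
      · have hne : k1 a ≠ k1 b := ne_of_gt h2
        simp [h1, h2, Prod.Lex.lt_iff, hne]
      · have he : k1 a = k1 b := le_antisymm (not_lt.mp h2) (not_lt.mp h1)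
        simp [h1, he, Prod.Lex.lt_iff]
  exact pvInsertSort_congr _ _ hb xs

-- The rank dict holds each priority name at its first index.
theorem pvRank_get_aux : ∀ (pri : List String) (n : Int) (d : PySem.Dict String Int) (k : String),
    PySem.Dict.get? ((PySem.List.enumerate pri n).foldl
      (fun d ic => if (PySem.Dict.get? d ic.2).isSome then d else PySem.Dict.insert d ic.2 ic.1) d) k
    = if (PySem.Dict.get? d k).isSome then PySem.Dict.get? d k
      else if k ∈ pri then some (n + (List.idxOf k pri : Int)) else none
  | [], n, d, k => by
    by_cases h : (PySem.Dict.get? d k).isSome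
    · simp [PySem.List.enumerate, h]
    · have h2 : PySem.Dict.get? d k = none := Option.not_isSome_iff_eq_none.mp h
      simp [PySem.List.enumerate, h, h2]
  | c :: cs, n, d, k => by
    have henum : PySem.List.enumerate (c :: cs) n = (n, c) :: PySem.List.enumerate cs (n + 1) := by
      simp [PySem.List.enumerate]
    rw [henum, List.foldl_cons]
    dsimp only
    by_cases hd : (PySem.Dict.get? d c).isSome
    · rw [if_pos hd, pvRank_get_aux cs (n + 1) d k]
      by_cases hk : (PySem.Dict.get? d k).isSome
      · rw [if_pos hk, if_pos hk]
      · rw [if_neg hk, if_neg hk]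
        have hkc : k ≠ c := fun he => hk (he ▸ hd)
        rw [List.idxOf_cons_ne cs (fun he => hkc he.symm)]
        by_cases hm : k ∈ cs
        · rw [if_pos hm, if_pos (List.mem_cons_of_mem c hm)]
          congr 1
          push_cast
          ring
        · rw [if_neg hm, if_neg (by simp [hkc, hm])]
    · rw [if_neg hd, pvRank_get_aux cs (n + 1) (PySem.Dict.insert d c n) k]
      by_cases hkc : k = c
      · subst hkc
        rw [if_pos (by rw [PySem.Dict.get?_insert_self]; rfl)]
        rw [PySem.Dict.get?_insert_self]
        rw [if_neg hd, if_pos List.mem_cons_self]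
        rw [List.idxOf_cons_self]
        simp
      · rw [PySem.Dict.get?_insert_of_ne d n hkc]
        by_cases hk : (PySem.Dict.get? d k).isSome
        · rw [if_pos hk, if_pos hk]
        · rw [if_neg hk, if_neg hk]
          rw [List.idxOf_cons_ne cs (fun he => hkc he.symm)]
          by_cases hm : k ∈ cs
          · rw [if_pos hm, if_pos (List.mem_cons_of_mem c hm)]
            congr 1
            push_cast
            ring
          · rw [if_neg hm, if_neg (by simp [hkc, hm])]

-- The core equality, after both functions have passed their two guards.
theorem pvCore (visible priority : List String) (chosen : Option String) (fb : String)
    (hnd : visible.Nodup) (hne : visible ≠ [])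
    (hch : ∀ c, chosen = some c → c ∈ visible) :
    (if (priority.foldl (pvA_step visible) (chosen.toList, chosen.toList)).1 ++ PySem.List.sorted (PySem.Set.diff visible (priority.foldl (pvA_step visible) (chosen.toList, chosen.toList)).2) (fun x => x) false = [] ∧ ¬(visible = []) then PySem.List.sorted visible (fun x => x) false
     else if (priority.foldl (pvA_step visible) (chosen.toList, chosen.toList)).1 ++ PySem.List.sorted (PySem.Set.diff visible (priority.foldl (pvA_step visible) (chosen.toList, chosen.toList)).2) (fun x => x) false = [] then [fb]
     else (priority.foldl (pvA_step visible) (chosen.toList, chosen.toList)).1 ++ PySem.List.sorted (PySem.Set.diff visible (priority.foldl (pvA_step visible) (chosen.toList, chosen.toList)).2) (fun x => x) false)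
    = PySem.List.sorted2 visible (fun k => (pvB_key chosen priority (pvB_rank priority) k).1) (fun k => (pvB_key chosen priority (pvB_rank priority) k).2) false := by
  rw [pvSel_foldl visible priority chosen.toList chosen.toList]
  set sel := pvSel visible priority chosen.toList with hsel
  set rest := PySem.List.sorted (PySem.Set.diff visible (chosen.toList ++ sel)) (fun x => x) false with hrest
  have hselmem : ∀ x ∈ sel, x ∈ priority ∧ x ∈ visible ∧ x ∉ chosen.toList :=
    fun x hx => (pvSel_mem visible priority chosen.toList x).mp hx
  have hrestmem : ∀ x ∈ rest, x ∈ visible ∧ x ∉ chosen.toList ++ sel := by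
    intro x hx
    rw [hrest, PySem.List.mem_sorted] at hx
    exact (PySem.Set.mem_diff _ _ _).mp hx
  have hget : ∀ y, PySem.Dict.get? (pvB_rank priority) y =
      if y ∈ priority then some ((List.idxOf y priority : Nat) : Int) else none := by
    intro y
    have h0 := pvRank_get_aux priority 0 PySem.Dict.empty y
    simpa [pvB_rank] using h0
  have hKch : ∀ c, chosen = some c → pvB_key chosen priority (pvB_rank priority) c = (0, "") := by
    intro c hc
    simp [pvB_key, hc]
  have hKsel : ∀ x ∈ sel, pvB_key chosen priority (pvB_rank priority) x = (1 + (List.idxOf x priority : Int), "") := by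
    intro x hx
    obtain ⟨hp, hv, hnc⟩ := hselmem x hx
    have hnc' : ¬ some x = chosen := by
      intro he
      apply hnc
      rw [← he]
      simp
    simp [pvB_key, hnc', hget, hp]
  have hKrest : ∀ x ∈ rest, pvB_key chosen priority (pvB_rank priority) x = (1 + (priority.length : Int), x) := by
    intro x hx
    obtain ⟨hv, hnp⟩ := hrestmem x hx
    have hnc : x ∉ chosen.toList := fun h => hnp (List.mem_append.mpr (Or.inl h))
    have hnsel : x ∉ sel := fun h => hnp (List.mem_append.mpr (Or.inr h))
    have hp : x ∉ priority := by
      intro hp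
      exact hnsel ((pvSel_mem visible priority chosen.toList x).mpr ⟨hp, hv, hnc⟩)
    have hnc' : ¬ some x = chosen := by
      intro he
      apply hnc
      rw [← he]
      simp
    simp [pvB_key, hnc', hget, hp]
  have hpair : ((chosen.toList ++ sel) ++ rest).Pairwise (fun a b =>
      (toLex ((pvB_key chosen priority (pvB_rank priority) a).1, (pvB_key chosen priority (pvB_rank priority) a).2) : Lex (Int × String))
        < toLex ((pvB_key chosen priority (pvB_rank priority) b).1, (pvB_key chosen priority (pvB_rank priority) b).2)) := by
    rw [List.pairwise_append]
    refine ⟨?_, ?_, ?_⟩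
    · rw [List.pairwise_append]
      refine ⟨?_, ?_, ?_⟩
      · cases chosen <;> simp
      · have h2 : sel.Pairwise (fun a b => List.idxOf a priority < List.idxOf b priority) := by
          rw [hsel, pvSel_eq_filter_dedup]
          exact List.Pairwise.sublist List.filter_sublist (pvDedup_pairwise_idx priority)
        refine List.Pairwise.imp_of_mem ?_ h2
        intro a b ha hb hab
        rw [hKsel a ha, hKsel b hb]
        rw [Prod.Lex.lt_iff]
        left
        simp only [ofLex_toLex]
        omega
      · intro a ha b hb
        have hc : chosen = some a := by
          cases chosen with
          | none => cases ha
          | some c => simp_all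
        rw [hKch a hc, hKsel b hb, Prod.Lex.lt_iff]
        left
        simp only [ofLex_toLex]
        omega
    · have hr1 : rest.Pairwise (fun a b => a ≤ b) := by
        have := PySem.List.sorted_pairwise (PySem.Set.diff visible (chosen.toList ++ sel)) (fun x => x)
        rw [← hrest] at this
        exact this
      have hrn : rest.Nodup := by
        have hd : (PySem.Set.diff visible (chosen.toList ++ sel)).Nodup := List.Nodup.filter _ hnd
        have hp2 := (PySem.List.sorted_perm (PySem.Set.diff visible (chosen.toList ++ sel)) (fun x => x) false).symm
        rw [← hrest] at hp2
        exact hp2.nodup hd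
      refine List.Pairwise.imp_of_mem ?_ (List.Pairwise.and hr1 hrn)
      rintro a b ha hb ⟨hle, hne'⟩
      rw [hKrest a ha, hKrest b hb, Prod.Lex.lt_iff]
      right
      exact ⟨rfl, lt_of_le_of_ne hle hne'⟩
    · intro a ha b hb
      rw [hKrest b hb]
      rcases List.mem_append.mp ha with h1 | h1
      · have hc : chosen = some a := by
          cases chosen with
          | none => cases h1
          | some c => simp_all
        rw [hKch a hc, Prod.Lex.lt_iff]
        left
        simp only [ofLex_toLex]
        omega
      · rw [hKsel a h1, Prod.Lex.lt_iff]
        left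
        have hlt := List.idxOf_lt_length_of_mem (hselmem a h1).1
        simp only [ofLex_toLex]
        omega
  have hysnodup : ((chosen.toList ++ sel) ++ rest).Nodup :=
    List.Pairwise.imp (fun hlt heq => absurd (heq ▸ hlt) (lt_irrefl _)) hpair
  have hperm : ((chosen.toList ++ sel) ++ rest).Perm visible := by
    rw [List.perm_ext_iff_of_nodup hysnodup hnd]
    intro x
    simp only [List.mem_append]
    constructor
    · rintro ((h1 | h1) | h1)
      · have hc : chosen = some x := by
          cases chosen with
          | none => cases h1
          | some c => simp_all
        exact hch _ hc
      · exact (hselmem x h1).2.1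
      · exact (hrestmem x h1).1
    · intro hx
      by_cases hc : x ∈ chosen.toList
      · exact Or.inl (Or.inl hc)
      · by_cases hp : x ∈ priority
        · exact Or.inl (Or.inr ((pvSel_mem visible priority chosen.toList x).mpr ⟨hp, hx, hc⟩))
        · right
          rw [hrest, PySem.List.mem_sorted]
          refine (PySem.Set.mem_diff _ _ _).mpr ⟨hx, ?_⟩
          intro hmem
          rcases List.mem_append.mp hmem with h1 | h1
          · exact hc h1
          · exact hp (hselmem x h1).1
  have hysne : (chosen.toList ++ sel) ++ rest ≠ [] := by
    intro h
    apply hne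
    have h2 : ([] : List String).Perm visible := h ▸ hperm
    exact (h2.symm).eq_nil
  rw [if_neg (fun hcon => hysne hcon.1), if_neg hysne]
  rw [pvSorted2_eq_lex]
  exact (PySem.List.sorted_eq_of_perm_of_pairwise_lt visible _ _ hperm hpair).symm

-- A's Etapa-1 state is (chosen.toList, chosen.toList) for B's chosen column.
theorem pvInit_eq (visible : List String) (tid : String) :
    pvA_init visible tid = ((pvB_chosen visible tid).toList, (pvB_chosen visible tid).toList) := by
  have hf : visible.filter (fun key => PySem.Str.startswith key "id_" && !(PySem.Set.contains (PySem.Set.empty : PySem.Set String) key)) = visible.filter (fun k => PySem.Str.startswith k "id_") := by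
    apply List.filter_congr
    intro x _
    simp [PySem.Set.contains, PySem.Set.empty]
  unfold pvA_init pvB_chosen
  rw [hf]
  by_cases h1 : PySem.Set.contains visible tid = true
  · rw [if_pos h1, if_pos h1]
    simp [PySem.Set.add, PySem.Set.empty]
  · rw [if_neg h1, if_neg h1]
    by_cases h2 : PySem.Set.contains visible "id" = true
    · rw [if_pos h2, if_pos h2]
      simp [PySem.Set.add, PySem.Set.empty]
    · rw [if_neg h2, if_neg h2]
      cases hs : PySem.List.sorted (visible.filter (fun k => PySem.Str.startswith k "id_")) (fun x => x) false with
      | nil => simp [PySem.Set.empty]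
      | cons c t => simp [PySem.Set.add, PySem.Set.empty]

theorem pvChosen_mem (visible : List String) (tid : String) (c : String)
    (h : pvB_chosen visible tid = some c) : c ∈ visible := by
  unfold pvB_chosen at h
  by_cases h1 : PySem.Set.contains visible tid = true
  · rw [if_pos h1] at h
    cases h
    exact (PySem.Set.contains_iff _ _).mp h1
  · rw [if_neg h1] at h
    by_cases h2 : PySem.Set.contains visible "id" = true
    · rw [if_pos h2] at h
      cases h
      exact (PySem.Set.contains_iff _ _).mp h2
    · rw [if_neg h2] at h
      cases hs : PySem.List.sorted (visible.filter (fun k => PySem.Str.startswith k "id_")) (fun x => x) false with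
      | nil => rw [hs] at h; cases h
      | cons c0 t =>
        rw [hs] at h
        cases h
        have hm : c ∈ PySem.List.sorted (visible.filter (fun k => PySem.Str.startswith k "id_")) (fun x => x) false := by
          rw [hs]; exact List.mem_cons_self
        rw [PySem.List.mem_sorted] at hm
        exact (List.mem_filter.mp hm).1

-- ===== VERDICT (by name: the statement is the Claim_ definition above) =====
theorem get_ordered_table_columns_spec : Claim_equal_get_ordered_table_columns := by
  intro ark tid hide pri fb _ hpre
  unfold Spec_get_ordered_table_columns
  dsimp only [get_ordered_table_columns, get_ordered_table_columns_alt]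
  by_cases h0 : ark = []
  · simp [h0]
  · rw [if_neg h0, if_neg h0]
    by_cases hv : PySem.Set.diff ark hide = []
    · simp [hv]
    · rw [if_neg hv, if_neg hv]
      have hnd : (PySem.Set.diff ark hide).Nodup := List.Nodup.filter _ hpre
      rw [pvInit_eq]
      exact pvCore (PySem.Set.diff ark hide) (pri.getD ["criado_em"]) (pvB_chosen (PySem.Set.diff ark hide) tid) fb hnd hv (fun c hc => pvChosen_mem _ _ _ hc)
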